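-- pv_equiv track=rewrite | github.com/3582730951/E2EE_Windows | tools/rime_dict_prepare.py | pick_latest_asset
-- ===== SOURCE A (Python) =====
-- def pick_latest_asset(assets, prefix):
--     candidates = [
--         a for a in assets
--         if a.get("name", "").startswith(prefix) and a.get("name", "").endswith(".dict.yaml")
--     ]
--     if not candidates:
--         return None
--     candidates.sort(key=lambda a: a.get("updated_at", ""))
--     return candidates[-1]
-- ===== SOURCE B (Python) =====
-- def pick_latest_asset(assets, prefix):
--     best = None
--     best_key = ""
--     for a in assets:
--         name = a.get("name", "")
--         if name.startswith(prefix) and name.endswith(".dict.yaml"):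
--             k = a.get("updated_at", "")
--             if best is None or best_key <= k:
--                 best = a
--                 best_key = k
--     return best
-- ===== Notes on version B (the rewrite author's own statement) =====
-- stated objective: simpler
-- what changed: Replaced the filter + full stable sort + last-element pick with a single linear scan keeping a running best (updated_at, using <= so the last candidate among equal timestamps wins, matching the stable sort).
import Mathlib
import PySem

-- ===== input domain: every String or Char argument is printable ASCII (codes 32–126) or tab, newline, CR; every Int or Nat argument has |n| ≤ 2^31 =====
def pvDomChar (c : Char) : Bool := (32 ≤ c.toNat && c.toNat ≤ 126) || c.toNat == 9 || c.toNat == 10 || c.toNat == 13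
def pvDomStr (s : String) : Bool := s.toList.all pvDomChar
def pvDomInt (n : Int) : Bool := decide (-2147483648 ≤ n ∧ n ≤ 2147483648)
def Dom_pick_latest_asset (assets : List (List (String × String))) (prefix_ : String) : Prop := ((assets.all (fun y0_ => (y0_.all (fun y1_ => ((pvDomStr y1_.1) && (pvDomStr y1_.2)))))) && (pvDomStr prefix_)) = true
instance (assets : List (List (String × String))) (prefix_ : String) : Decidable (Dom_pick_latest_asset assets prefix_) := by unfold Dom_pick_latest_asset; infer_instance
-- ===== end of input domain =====

-- B replaces A's filter + stable sort + last-element pick by a single linear scan with a running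
-- best candidate (objective: simpler). A sorts only a fresh local list, so no argument mutation is observable.


-- ===== PORT A =====
def pick_latest_asset (assets : List (List (String × String))) (prefix_ : String) : Option (List (String × String)) :=
  let candidates := assets.filter (fun a =>
    PySem.Str.startswith (PySem.Dict.getD ⟨a⟩ "name" "") prefix_ &&
    PySem.Str.endswith (PySem.Dict.getD ⟨a⟩ "name" "") ".dict.yaml")
  if candidates = [] then none
  else PySem.List.pyGet? (PySem.List.sorted candidates (fun a => PySem.Dict.getD ⟨a⟩ "updated_at" "") false) (-1)

-- ===== PORT B =====
def pick_latest_asset_alt (assets : List (List (String × String))) (prefix_ : String) : Option (List (String × String)) :=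
  (assets.foldl (fun (st : Option (List (String × String)) × String) a =>
      let name := PySem.Dict.getD ⟨a⟩ "name" ""
      if PySem.Str.startswith name prefix_ && PySem.Str.endswith name ".dict.yaml" then
        let k := PySem.Dict.getD ⟨a⟩ "updated_at" ""
        if st.1.isNone || decide (st.2 ≤ k) then (some a, k) else st
      else st) (none, "")).1

-- ===== PRECONDITION & SPEC =====
def Spec_pick_latest_asset (assets : List (List (String × String))) (prefix_ : String) (out : Option (List (String × String))) : Prop := out = pick_latest_asset_alt assets prefix_
instance (assets : List (List (String × String))) (prefix_ : String) (out : Option (List (String × String))) : Decidable (Spec_pick_latest_asset assets prefix_ out) := by unfold Spec_pick_latest_asset; infer_instance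

-- ===== CLAIM (what is proved, stated in full; the proofs are below) =====
def Claim_equal_pick_latest_asset : Prop := ∀ (assets : List (List (String × String))) (prefix_ : String), Dom_pick_latest_asset assets prefix_ → Spec_pick_latest_asset assets prefix_ (pick_latest_asset assets prefix_)

-- ===== LEMMAS AND PROOFS =====

-- the sort key both programs read
def pvKey (a : List (String × String)) : String := PySem.Dict.getD ⟨a⟩ "updated_at" ""

-- B's scan step, specialised to the already-filtered candidate list
def pvStep (st : Option (List (String × String)) × String) (a : List (String × String)) :
    Option (List (String × String)) × String :=
  if st.1.isNone || decide (st.2 ≤ pvKey a) then (some a, pvKey a) else st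

-- the scan state corresponding to a current best candidate
def pvToState (o : Option (List (String × String))) : Option (List (String × String)) × String :=
  match o with
  | none => (none, "")
  | some b => (some b, pvKey b)

-- inserting c into a key-sorted list: the last element becomes c iff the old last's key ≤ key c
theorem pvInsert_last (c : List (String × String)) (acc : List (List (String × String)))
    (b : List (String × String))
    (hp : acc.Pairwise (fun x y => pvKey x ≤ pvKey y)) (hl : acc.getLast? = some b) :
    (PySem.List.insertBy (fun x y => decide (pvKey x < pvKey y)) c acc).getLast? =
      if pvKey b ≤ pvKey c then some c else some b := by
  induction acc generalizing b with
  | nil => simp at hl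
  | cons y ys ih =>
    cases ys with
    | nil =>
      have hyb : y = b := by simpa using hl
      subst hyb
      by_cases hcy : pvKey c < pvKey y
      · simp [PySem.List.insertBy, String.lt_iff_toList_lt.mp hcy, not_le.mpr hcy]
      · have h1 : ¬ (pvKey c).toList < (pvKey y).toList := fun hh => hcy (String.lt_iff_toList_lt.mpr hh)
        simp [PySem.List.insertBy, h1, not_lt.mp hcy]
    | cons z zs =>
      have hl' : (z :: zs).getLast? = some b := by
        simpa [List.getLast?_cons_cons] using hl
      have hyb : pvKey y ≤ pvKey b := by
        have hmem : b ∈ z :: zs := List.mem_of_getLast? hl'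
        exact (List.pairwise_cons.mp hp).1 b hmem
      by_cases hcy : pvKey c < pvKey y
      · have hcb : pvKey c < pvKey b := lt_of_lt_of_le hcy hyb
        simp [PySem.List.insertBy, String.lt_iff_toList_lt.mp hcy, List.getLast?_cons_cons, hl,
              not_le.mpr hcb]
      · have ihh := ih b (List.pairwise_cons.mp hp).2 hl'
        have hne : PySem.List.insertBy (fun x y => decide (pvKey x < pvKey y)) c (z :: zs) ≠ [] := by
          cases hzz : PySem.List.insertBy (fun x y => decide (pvKey x < pvKey y)) c (z :: zs) with
          | nil => simp [PySem.List.insertBy] at hzz; split at hzz <;> simp_all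
          | cons _ _ => simp
        rw [show PySem.List.insertBy (fun x y => decide (pvKey x < pvKey y)) c (y :: z :: zs)
              = y :: PySem.List.insertBy (fun x y => decide (pvKey x < pvKey y)) c (z :: zs) by
            simp [PySem.List.insertBy]
            intro hh
            exact absurd (String.lt_iff_toList_lt.mpr hh) hcy]
        obtain ⟨w, ws, hw⟩ := List.exists_cons_of_ne_nil hne
        rw [hw, List.getLast?_cons_cons, ← hw, ihh]

-- one insertion-sort step, read off the library's foldl form of sorted
theorem pvSorted_snoc (pre : List (List (String × String))) (c : List (String × String)) :
    PySem.List.sorted (pre ++ [c]) pvKey false =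
      PySem.List.insertBy (fun x y => decide (pvKey x < pvKey y)) c (PySem.List.sorted pre pvKey false) := by
  rw [PySem.List.sorted_eq_foldl_insertBy, PySem.List.sorted_eq_foldl_insertBy, List.foldl_append]
  rfl

-- the scan invariant: folding the candidates tracks the last element of the sorted prefix
theorem pvScan (cs pre : List (List (String × String))) :
    cs.foldl pvStep (pvToState ((PySem.List.sorted pre pvKey false).getLast?)) =
      pvToState ((PySem.List.sorted (pre ++ cs) pvKey false).getLast?) := by
  induction cs generalizing pre with
  | nil => simp
  | cons c cs ih =>
    have hstep : pvStep (pvToState ((PySem.List.sorted pre pvKey false).getLast?)) c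
        = pvToState ((PySem.List.sorted (pre ++ [c]) pvKey false).getLast?) := by
      cases hgl : (PySem.List.sorted pre pvKey false).getLast? with
      | none =>
        have hpre : pre = [] := by
          have := List.getLast?_eq_none_iff.mp hgl
          exact (PySem.List.sorted_eq_nil_iff pre pvKey false).mp this
        subst hpre
        simp [pvToState, pvStep, PySem.List.insertBy, PySem.List.sorted]
      | some b =>
        have hlast := pvInsert_last c (PySem.List.sorted pre pvKey false) b
          (PySem.List.sorted_pairwise pre pvKey) hgl
        rw [pvSorted_snoc, hlast]
        by_cases hbc : pvKey b ≤ pvKey c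
        · simp [pvToState, pvStep, hbc]
        · simp [pvToState, pvStep, hbc]
    rw [List.foldl_cons, hstep, ih (pre ++ [c])]
    simp

-- xs[-1] is the last element (for nonempty xs)
theorem pvGet_neg_one {α : Type} (xs : List α) (h : xs ≠ []) :
    PySem.List.pyGet? xs (-1) = xs.getLast? := by
  have hn : 0 < xs.length := List.length_pos_iff.mpr h
  simp [PySem.List.pyGet?, PySem.List.pyIdx?, Nat.one_le_iff_ne_zero.mpr (Nat.pos_iff_ne_zero.mp hn),
        List.getLast?_eq_getElem?]

-- ===== VERDICT (by name: the statement is the Claim_ definition above) =====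
theorem pick_latest_asset_spec : Claim_equal_pick_latest_asset := by
  intro assets prefix_ _
  unfold Spec_pick_latest_asset pick_latest_asset pick_latest_asset_alt
  have hB : (assets.foldl (fun (st : Option (List (String × String)) × String) a =>
        let name := PySem.Dict.getD ⟨a⟩ "name" ""
        if PySem.Str.startswith name prefix_ && PySem.Str.endswith name ".dict.yaml" then
          let k := PySem.Dict.getD ⟨a⟩ "updated_at" ""
          if st.1.isNone || decide (st.2 ≤ k) then (some a, k) else st
        else st) (none, ""))
      = (assets.filter (fun a =>
        PySem.Str.startswith (PySem.Dict.getD ⟨a⟩ "name" "") prefix_ &&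
        PySem.Str.endswith (PySem.Dict.getD ⟨a⟩ "name" "") ".dict.yaml")).foldl pvStep (none, "") := by
    rw [List.foldl_filter]
    rfl
  set cs := assets.filter (fun a =>
        PySem.Str.startswith (PySem.Dict.getD ⟨a⟩ "name" "") prefix_ &&
        PySem.Str.endswith (PySem.Dict.getD ⟨a⟩ "name" "") ".dict.yaml") with hcs
  simp only [hB]
  have hscan := pvScan cs []
  have h0 : pvToState ((PySem.List.sorted ([] : List (List (String × String))) pvKey false).getLast?) = (none, "") := by rfl
  rw [h0] at hscan
  simp only [List.nil_append] at hscan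
  rw [hscan, show (fun a => PySem.Dict.getD (⟨a⟩ : PySem.Dict String String) "updated_at" "") = pvKey from rfl]
  by_cases hnil : cs = []
  · simp only [hnil, if_true]; rfl
  · have hsn : PySem.List.sorted cs pvKey false ≠ [] := by
      intro hh; exact hnil ((PySem.List.sorted_eq_nil_iff cs pvKey false).mp hh)
    simp only [hnil, if_false]
    rw [pvGet_neg_one _ hsn]
    cases hgl : (PySem.List.sorted cs pvKey false).getLast? with
    | none => exact absurd (List.getLast?_eq_none_iff.mp hgl) hsn
    | some b => simp [pvToState, pvKey]
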